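-- pv_equiv track=rewrite | github.com/hodayagradwohl/GeneticAlgorithms | perfect_magic_square.py | _get_ring_indices
-- ===== SOURCE A (Python) =====
-- def _get_ring_indices(nn, rr):
--     indices = []
--     for j in range(rr, nn - rr): indices.append(rr * nn + j)
--     for i in range(rr + 1, nn - rr - 1): indices.append(i * nn + (nn - rr - 1))
--     if nn - rr - 1 > rr:
--         for j in range(nn - rr - 1, rr - 1, -1): indices.append((nn - rr - 1) * nn + j)
--     if rr < nn - rr - 1:
--         for i in range(nn - rr - 2, rr, -1): indices.append(i * nn + rr)
--     return indices
-- ===== SOURCE B (Python) =====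
-- def _get_ring_indices(nn, rr):
--     side = nn - 2 * rr
--     if side <= 0:
--         return []
--     if side == 1:
--         return [rr * nn + rr]
--     out = []
--     i, j = rr, rr
--     for di, dj in ((0, 1), (1, 0), (0, -1), (-1, 0)):
--         for _ in range(side - 1):
--             out.append(i * nn + j)
--             i += di
--             j += dj
--     return out
-- ===== Notes on version B (the rewrite author's own statement) =====
-- stated objective: alternative
-- what changed: Replaced the four separate edge loops (with their two corner guards) by a single clockwise perimeter walk: one loop over four direction vectors emitting side-1 cells each from the ring's top-left corner.
import Mathlib
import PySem

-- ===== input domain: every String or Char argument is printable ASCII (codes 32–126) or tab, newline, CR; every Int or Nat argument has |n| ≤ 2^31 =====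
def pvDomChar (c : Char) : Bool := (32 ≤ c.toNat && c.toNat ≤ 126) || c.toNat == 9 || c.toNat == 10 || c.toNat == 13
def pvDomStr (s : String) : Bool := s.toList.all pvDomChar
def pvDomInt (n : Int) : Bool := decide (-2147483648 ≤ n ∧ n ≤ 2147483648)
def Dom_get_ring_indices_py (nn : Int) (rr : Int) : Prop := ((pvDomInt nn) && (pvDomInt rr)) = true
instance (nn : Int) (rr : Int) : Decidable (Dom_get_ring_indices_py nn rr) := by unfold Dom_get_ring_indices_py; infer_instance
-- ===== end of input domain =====

-- B replaces A's four edge loops (and two corner guards) by a single clockwise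
-- perimeter walk cycling four direction vectors; same values, same order (objective: alternative).

-- ===== PORT A =====
-- literal transliteration of A: four append loops, the last two guarded
def get_ring_indices_py (nn : Int) (rr : Int) : List Int :=
  let indices : List Int := []
  let indices := (PySem.List.pyRange rr (nn - rr) 1).foldl
    (fun acc j => acc ++ [rr * nn + j]) indices
  let indices := (PySem.List.pyRange (rr + 1) (nn - rr - 1) 1).foldl
    (fun acc i => acc ++ [i * nn + (nn - rr - 1)]) indices
  let indices := if nn - rr - 1 > rr then
      (PySem.List.pyRange (nn - rr - 1) (rr - 1) (-1)).foldl
        (fun acc j => acc ++ [(nn - rr - 1) * nn + j]) indices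
    else indices
  let indices := if rr < nn - rr - 1 then
      (PySem.List.pyRange (nn - rr - 2) rr (-1)).foldl
        (fun acc i => acc ++ [i * nn + rr]) indices
    else indices
  indices

-- ===== PORT B =====
-- B-side helper: the inner 'for _ in range(k): out.append(i*nn+j); i += di; j += dj'
def pvEmit (nn : Int) : Nat → Int → Int → Int → Int → List Int → List Int × Int × Int
  | 0, i, j, _, _, out => (out, i, j)
  | k + 1, i, j, di, dj, out => pvEmit nn k (i + di) (j + dj) di dj (out ++ [i * nn + j])

def get_ring_indices_py_alt (nn : Int) (rr : Int) : List Int :=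
  let side := nn - 2 * rr
  if side ≤ 0 then []
  else if side = 1 then [rr * nn + rr]
  else
    let dirs : List (Int × Int) := [(0, 1), (1, 0), (0, -1), (-1, 0)]
    (dirs.foldl
      (fun (st : List Int × Int × Int) d =>
        pvEmit nn (side - 1).toNat st.2.1 st.2.2 d.1 d.2 st.1)
      ([], rr, rr)).1

-- ===== PRECONDITION & SPEC =====
def Spec_get_ring_indices_py (nn : Int) (rr : Int) (out : List Int) : Prop := out = get_ring_indices_py_alt nn rr
instance (nn : Int) (rr : Int) (out : List Int) : Decidable (Spec_get_ring_indices_py nn rr out) := by unfold Spec_get_ring_indices_py; infer_instance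

-- ===== CLAIM (what is proved, stated in full; the proofs are below) =====
def Claim_equal_get_ring_indices_py : Prop := ∀ (nn : Int) (rr : Int), Dom_get_ring_indices_py nn rr → Spec_get_ring_indices_py nn rr (get_ring_indices_py nn rr)

-- ===== LEMMAS AND PROOFS =====

-- pvEmit appends the straight-line walk of k cells to out and advances the position
theorem pvEmit_eq (nn : Int) (k : Nat) :
    ∀ (i j di dj : Int) (out : List Int),
      pvEmit nn k i j di dj out =
        (out ++ (List.range k).map (fun t : Nat => (i + (t : Int) * di) * nn + (j + (t : Int) * dj)),
         i + (k : Int) * di, j + (k : Int) * dj) := by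
  induction k with
  | zero => intro i j di dj out; simp [pvEmit]
  | succ k ih =>
      intro i j di dj out
      rw [pvEmit, ih, List.range_succ_eq_map]
      simp only [List.map_cons, List.map_map]
      refine Prod.ext ?_ (Prod.ext ?_ ?_)
      · show out ++ [i * nn + j] ++ _ = out ++ _ :: _
        rw [List.append_assoc]
        congr 1
        rw [List.singleton_append]
        congr 1
        · push_cast; ring_nf
        · apply List.map_congr_left
          intro t _
          simp only [Function.comp_apply, Nat.succ_eq_add_one]
          push_cast; ring
      · show i + di + (k : Int) * di = i + ((k : Nat) + 1 : Int) * di; ring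
      · show j + dj + (k : Int) * dj = j + ((k : Nat) + 1 : Int) * dj; ring

-- split a map over range (m+1) at the front / at the back
theorem map_range_succ_left (f : Nat → Int) (m : Nat) :
    (List.range (m + 1)).map f = f 0 :: (List.range m).map (fun t => f (t + 1)) := by
  rw [List.range_succ_eq_map, List.map_cons, List.map_map]
  simp [Function.comp, Nat.succ_eq_add_one]

theorem map_range_succ_right (f : Nat → Int) (m : Nat) :
    (List.range (m + 1)).map f = (List.range m).map f ++ [f m] := by
  rw [List.range_succ, List.map_append, List.map_cons, List.map_nil]

-- regrouping: four edges (top/right/bottom/left) = four equal-length walk segments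
theorem ring_regroup (T R B L S1 S2 S3 S4 : Nat → Int) (m : Nat)
    (h1 : ∀ t, T t = S1 t) (h2 : T (m + 1) = S2 0) (h3 : ∀ t, R t = S2 (t + 1))
    (h4 : ∀ t, B t = S3 t) (h5 : B (m + 1) = S4 0) (h6 : ∀ t, L t = S4 (t + 1)) :
    (List.range (m + 2)).map T ++
      ((List.range m).map R ++ ((List.range (m + 2)).map B ++ (List.range m).map L)) =
    (List.range (m + 1)).map S1 ++
      ((List.range (m + 1)).map S2 ++
        ((List.range (m + 1)).map S3 ++ (List.range (m + 1)).map S4)) := by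
  rw [show m + 2 = (m + 1) + 1 from rfl,
      map_range_succ_right T (m + 1), map_range_succ_right B (m + 1),
      map_range_succ_left S2 m, map_range_succ_left S4 m,
      h2, h5, funext h1, funext h3, funext h4, funext h6]
  simp [List.append_assoc]

theorem get_ring_indices_py_eq (nn rr : Int) :
    get_ring_indices_py nn rr = get_ring_indices_py_alt nn rr := by
  rcases lt_trichotomy (nn - 2 * rr) 1 with hlt | heq | hgt
  · -- side ≤ 0 : both return []
    simp only [get_ring_indices_py, get_ring_indices_py_alt]
    rw [PySem.List.pyRange_one_eq_nil (show nn - rr ≤ rr by omega),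
        PySem.List.pyRange_one_eq_nil (show nn - rr - 1 ≤ rr + 1 by omega),
        if_neg (show ¬ nn - rr - 1 > rr by omega),
        if_neg (show ¬ rr < nn - rr - 1 by omega),
        if_pos (show nn - 2 * rr ≤ 0 by omega)]
    rfl
  · -- side = 1 : both return [rr*nn + rr]
    simp only [get_ring_indices_py, get_ring_indices_py_alt]
    rw [PySem.List.pyRange_one, PySem.List.pyRange_one,
        show (nn - rr - rr).toNat = 1 by omega,
        show (nn - rr - 1 - (rr + 1)).toNat = 0 by omega,
        if_neg (show ¬ nn - rr - 1 > rr by omega),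
        if_neg (show ¬ rr < nn - rr - 1 by omega),
        if_neg (show ¬ nn - 2 * rr ≤ 0 by omega),
        if_pos heq]
    simp
  · -- side ≥ 2 : four edges vs four walk segments
    obtain ⟨m, hm⟩ : ∃ m : Nat, nn = 2 * rr + ((m : Int) + 2) :=
      ⟨(nn - 2 * rr - 2).toNat, by omega⟩
    subst hm
    simp only [get_ring_indices_py, get_ring_indices_py_alt]
    rw [if_pos (by omega), if_pos (by omega), if_neg (by omega),
        if_neg (show ¬ 2 * rr + ((m : Int) + 2) - 2 * rr = 1 by omega)]
    simp only [List.foldl]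
    rw [show (2 * rr + ((m : Int) + 2) - 2 * rr - 1).toNat = m + 1 by omega]
    rw [pvEmit_eq, pvEmit_eq, pvEmit_eq, pvEmit_eq]
    simp only [PySem.List.foldl_append_singleton_eq_map,
      PySem.List.pyRange_one, PySem.List.pyRange_neg_one]
    rw [show (2 * rr + ((m : Int) + 2) - rr - rr).toNat = m + 2 by omega,
        show (2 * rr + ((m : Int) + 2) - rr - 1 - (rr + 1)).toNat = m by omega,
        show (2 * rr + ((m : Int) + 2) - rr - 1 - (rr - 1)).toNat = m + 2 by omega,
        show (2 * rr + ((m : Int) + 2) - rr - 2 - rr).toNat = m by omega]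
    simp only [List.map_map, List.append_assoc, List.nil_append]
    exact ring_regroup _ _ _ _ _ _ _ _ m
      (fun t => by simp only [Function.comp_apply]; ring)
      (by simp only [Function.comp_apply]; push_cast; ring)
      (fun t => by simp only [Function.comp_apply]; push_cast; ring)
      (fun t => by simp only [Function.comp_apply]; push_cast; ring)
      (by simp only [Function.comp_apply]; push_cast; ring)
      (fun t => by simp only [Function.comp_apply]; push_cast; ring)

-- ===== VERDICT (by name: the statement is the Claim_ definition above) =====
theorem get_ring_indices_py_spec : Claim_equal_get_ring_indices_py := by
  intro nn rr _
  unfold Spec_get_ring_indices_py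
  exact get_ring_indices_py_eq nn rr
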